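-- pv_equiv track=rewrite | github.com/zhuiyuzhuiyu/AiHarness | scripts/harness.py | collect_risks
-- ===== SOURCE A (Python) =====
-- from typing import Any, Iterable
--
-- RISK_PATTERNS = {
--     "security": [
--         "auth",
--         "permission",
--         "secret",
--         "token",
--         "oauth",
--         "security",
--         "credential",
--         "session",
--         "privacy",
--     ],
--     "billing": [
--         "billing",
--         "payment",
--         "invoice",
--         "refund",
--         "subscription",
--     ],
--     "migration": [
--         "migration",
--         "schema",
--         "ddl",
--         "seed",
--         "backfill",
--         "database",
--         "db/",
--     ],
--     "infrastructure": [
--         "deploy",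
--         "terraform",
--         "infra",
--         "k8s",
--         "helm",
--         "docker",
--         "cloudbuild",
--         ".github/workflows",
--     ],
-- }
--
-- def collect_risks(changed_files: Iterable[str]) -> dict[str, list[str]]:
--     findings: dict[str, list[str]] = {}
--     for rel_path in changed_files:
--         lower = rel_path.lower()
--         for risk, patterns in RISK_PATTERNS.items():
--             if any(pattern in lower for pattern in patterns):
--                 findings.setdefault(risk, []).append(rel_path)
--     return findings
-- ===== SOURCE B (Python) =====
-- from typing import Iterable
--
-- RISK_PATTERNS = {
--     "security": ["auth", "permission", "secret", "token", "oauth", "security",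
--                  "credential", "session", "privacy"],
--     "billing": ["billing", "payment", "invoice", "refund", "subscription"],
--     "migration": ["migration", "schema", "ddl", "seed", "backfill", "database", "db/"],
--     "infrastructure": ["deploy", "terraform", "infra", "k8s", "helm", "docker",
--                        "cloudbuild", ".github/workflows"],
-- }
--
--
-- def collect_risks(changed_files: Iterable[str]) -> dict[str, list[str]]:
--     # Flatten to (risk, file) hit pairs, then group the hits by risk.
--     hits = [(risk, f)
--             for f in changed_files
--             for risk, patterns in RISK_PATTERNS.items()
--             if any(p in f.lower() for p in patterns)]
--     return {risk: [f for r, f in hits if r == risk] for risk, _ in hits}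
-- ===== Notes on version B (the rewrite author's own statement) =====
-- stated objective: simpler
-- what changed: A makes one pass over the files mutating a findings dict via setdefault/append per matched category; B first flattens the input into a list of (risk, file) hit pairs with one comprehension and then groups those hits by risk with a dict comprehension, with no mutation.
import Mathlib
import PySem

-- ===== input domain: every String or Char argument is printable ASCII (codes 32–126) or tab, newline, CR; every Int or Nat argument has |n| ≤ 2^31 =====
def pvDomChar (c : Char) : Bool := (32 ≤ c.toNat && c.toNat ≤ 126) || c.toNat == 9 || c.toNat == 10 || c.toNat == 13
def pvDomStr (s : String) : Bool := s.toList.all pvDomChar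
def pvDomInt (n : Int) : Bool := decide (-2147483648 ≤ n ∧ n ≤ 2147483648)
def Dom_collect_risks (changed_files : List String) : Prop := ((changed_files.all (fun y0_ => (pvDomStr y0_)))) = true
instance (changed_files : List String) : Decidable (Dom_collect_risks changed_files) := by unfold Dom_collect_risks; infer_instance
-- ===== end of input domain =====

-- B replaces A's stateful file pass (setdefault/append into a dict) by flattening the
-- input into (risk, file) hit pairs and grouping them with a dict comprehension
-- (objective: simpler, no mutation; not faster).

def RISK_PATTERNS : List (String × List String) :=
  [("security", ["auth", "permission", "secret", "token", "oauth", "security",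
                 "credential", "session", "privacy"]),
   ("billing", ["billing", "payment", "invoice", "refund", "subscription"]),
   ("migration", ["migration", "schema", "ddl", "seed", "backfill", "database", "db/"]),
   ("infrastructure", ["deploy", "terraform", "infra", "k8s", "helm", "docker",
                       "cloudbuild", ".github/workflows"])]

-- ===== PORT A =====
-- any(pattern in lower for pattern in patterns)
def pvMatches (lower : String) (patterns : List String) : Bool :=
  patterns.any (fun pattern => PySem.Str.isIn pattern lower)

-- body of A's outer loop: findings.setdefault(risk, []).append(rel_path) for each matching risk
def pvStep (findings : PySem.Dict String (List String)) (rel_path : String) :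
    PySem.Dict String (List String) :=
  let lower := PySem.Str.lower rel_path
  RISK_PATTERNS.foldl
    (fun d c =>
      if pvMatches lower c.2 then d.insert c.1 (d.getD c.1 [] ++ [rel_path]) else d)
    findings

def collect_risks (changed_files : List String) : List (String × List String) :=
  (changed_files.foldl pvStep PySem.Dict.empty).items

-- ===== PORT B =====
-- hits = [(risk, f) for f in changed_files for risk, patterns in RISK_PATTERNS.items()
--         if any(p in f.lower() for p in patterns)]
def pvHits (changed_files : List String) : List (String × String) :=
  changed_files.flatMap (fun f =>
    (RISK_PATTERNS.filter (fun c => pvMatches (PySem.Str.lower f) c.2)).map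
      (fun c => (c.1, f)))

-- {risk: [f for r, f in hits if r == risk] for risk, _ in hits}
def collect_risks_alt (changed_files : List String) : List (String × List String) :=
  let hits := pvHits changed_files
  (hits.foldl
    (fun d p => d.insert p.1 ((hits.filter (fun q => q.1 == p.1)).map (·.2)))
    PySem.Dict.empty).items

-- ===== PRECONDITION & SPEC =====
def Spec_collect_risks (changed_files : List String) (out : List (String × List String)) : Prop := out = collect_risks_alt changed_files
instance (changed_files : List String) (out : List (String × List String)) : Decidable (Spec_collect_risks changed_files out) := by unfold Spec_collect_risks; infer_instance

-- ===== CLAIM (what is proved, stated in full; the proofs are below) =====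
def Claim_equal_collect_risks : Prop := ∀ (changed_files : List String), Dom_collect_risks changed_files → Spec_collect_risks changed_files (collect_risks changed_files)

-- ===== LEMMAS AND PROOFS =====

-- the setdefault/append step on one (risk, file) hit
def pvIns (d : PySem.Dict String (List String)) (p : String × String) :
    PySem.Dict String (List String) :=
  d.insert p.1 (d.getD p.1 [] ++ [p.2])

-- files of the hits carrying key k, in order
def pvGrp (H : List (String × String)) (k : String) : List String :=
  (H.filter (fun q => q.1 == k)).map (·.2)

-- keys in first-occurrence order
def pvFirsts : List String → List String
  | [] => []
  | k :: t => k :: (pvFirsts t).filter (fun x => !(x == k))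

lemma pvGrp_cons (p : String × String) (T : List (String × String)) (k : String) :
    pvGrp (p :: T) k = if p.1 = k then p.2 :: pvGrp T k else pvGrp T k := by
  by_cases h : p.1 = k <;> simp [pvGrp, h]

-- A-side invariant: folding the setdefault/append step over hits H extends existing
-- keys by their groups and appends the fresh keys in first-occurrence order.
lemma pvIns_foldl_items (H : List (String × String)) (d : PySem.Dict String (List String))
    (hd : d.keys.Nodup) :
    (H.foldl pvIns d).items
      = d.items.map (fun e => (e.1, e.2 ++ pvGrp H e.1))
        ++ ((pvFirsts (H.map (·.1))).filter (fun k => !d.contains k)).map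
             (fun k => (k, pvGrp H k)) := by
  induction H generalizing d with
  | nil => simp [pvGrp, pvFirsts]
  | cons p T ih =>
    obtain ⟨k₀, f₀⟩ := p
    have hstep : (((k₀, f₀) :: T).foldl pvIns d) = T.foldl pvIns (pvIns d (k₀, f₀)) := rfl
    have hd' : (pvIns d (k₀, f₀)).keys.Nodup := PySem.Dict.nodup_keys_insert _ _ _ hd
    rw [hstep, ih _ hd']
    have hfirst : pvFirsts (((k₀, f₀) :: T).map (·.1))
        = k₀ :: (pvFirsts (T.map (·.1))).filter (fun x => !(x == k₀)) := by
      simp [pvFirsts]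
    by_cases hc : d.contains k₀ = true
    · -- existing key: value extended in place
      have hitems : (pvIns d (k₀, f₀)).items
          = d.items.map (fun e => if e.1 == k₀ then (k₀, d.getD k₀ [] ++ [f₀]) else e) :=
        PySem.Dict.items_insert_of_contains _ _ hc
      have hmap : ((pvIns d (k₀, f₀)).items).map (fun e => (e.1, e.2 ++ pvGrp T e.1))
          = d.items.map (fun e => (e.1, e.2 ++ pvGrp ((k₀, f₀) :: T) e.1)) := by
        rw [hitems, List.map_map]
        refine List.map_congr_left (fun e he => ?_)
        by_cases hek : e.1 = k₀
        · have hgd : d.getD k₀ [] = e.2 := by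
            have : (k₀, e.2) ∈ d.items := by rw [← hek]; exact he
            exact PySem.Dict.getD_of_mem_items _ this hd []
          simp [Function.comp, hek, hgd, pvGrp_cons]
        · have : (e.1 == k₀) = false := by simpa using hek
          simp [Function.comp, this, pvGrp_cons, Ne.symm hek]
      rw [hmap, hfirst]
      have hconts : ∀ k, ((pvIns d (k₀, f₀)).contains k) = (k == k₀ || d.contains k) := by
        intro k; simp [pvIns, PySem.Dict.contains_insert]
      have hfilt : (pvFirsts (T.map (·.1))).filter (fun k => !(pvIns d (k₀, f₀)).contains k)
          = ((pvFirsts (T.map (·.1))).filter (fun x => !(x == k₀))).filter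
              (fun k => !d.contains k) := by
        rw [List.filter_filter]
        exact List.filter_congr (fun k _ => by rw [hconts]; cases h : (k == k₀) <;> simp)
      rw [hfilt]
      have hdrop : List.filter (fun k => !d.contains k)
            (k₀ :: (pvFirsts (T.map (·.1))).filter (fun x => !(x == k₀)))
          = ((pvFirsts (T.map (·.1))).filter (fun x => !(x == k₀))).filter
              (fun k => !d.contains k) := by
        rw [List.filter_cons]; simp [hc]
      rw [hdrop]
      congr 1
      refine List.map_congr_left (fun k hk => ?_)
      have hkne : k ≠ k₀ := by
        have := (List.mem_filter.mp ((List.mem_filter.mp hk).1)).2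
        simpa using this
      rw [pvGrp_cons]; simp [Ne.symm hkne]
    · -- fresh key: appended at the end
      have hc' : d.contains k₀ = false := by simpa using hc
      have hitems : (pvIns d (k₀, f₀)).items = d.items ++ [(k₀, [] ++ [f₀])] := by
        show (d.insert k₀ (d.getD k₀ [] ++ [f₀])).items = _
        rw [PySem.Dict.getD_of_not_contains _ _ hc']
        exact PySem.Dict.items_insert_of_not_contains _ _ hc'
      have hdk : ∀ e ∈ d.items, e.1 ≠ k₀ := by
        intro e he hek
        have : d.contains e.1 = true := by
          rw [PySem.Dict.contains_iff_mem_keys]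
          exact PySem.Dict.mem_keys_of_mem_items _ he
        rw [hek, hc'] at this; exact absurd this (by simp)
      have hmapA : d.items.map (fun e => (e.1, e.2 ++ pvGrp T e.1))
          = d.items.map (fun e => (e.1, e.2 ++ pvGrp ((k₀, f₀) :: T) e.1)) := by
        refine List.map_congr_left (fun e he => ?_)
        rw [pvGrp_cons]; simp [Ne.symm (hdk e he)]
      have hmap : ((pvIns d (k₀, f₀)).items).map (fun e => (e.1, e.2 ++ pvGrp T e.1))
          = d.items.map (fun e => (e.1, e.2 ++ pvGrp ((k₀, f₀) :: T) e.1))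
            ++ [(k₀, f₀ :: pvGrp T k₀)] := by
        rw [hitems, List.map_append, hmapA]
        simp
      rw [hmap, hfirst]
      have hconts : ∀ k, ((pvIns d (k₀, f₀)).contains k) = (k == k₀ || d.contains k) := by
        intro k; simp [pvIns, PySem.Dict.contains_insert]
      have hfilt : (pvFirsts (T.map (·.1))).filter (fun k => !(pvIns d (k₀, f₀)).contains k)
          = ((pvFirsts (T.map (·.1))).filter (fun x => !(x == k₀))).filter
              (fun k => !d.contains k) := by
        rw [List.filter_filter]
        exact List.filter_congr (fun k _ => by rw [hconts]; cases h : (k == k₀) <;> simp)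
      rw [hfilt]
      have hkeep : List.filter (fun k => !d.contains k)
            (k₀ :: (pvFirsts (T.map (·.1))).filter (fun x => !(x == k₀)))
          = k₀ :: ((pvFirsts (T.map (·.1))).filter (fun x => !(x == k₀))).filter
              (fun k => !d.contains k) := by
        rw [List.filter_cons]; simp [hc']
      have hk₀ : pvGrp ((k₀, f₀) :: T) k₀ = f₀ :: pvGrp T k₀ := by
        rw [pvGrp_cons]; simp
      have htail : List.map (fun k => (k, pvGrp T k))
            (((pvFirsts (T.map (·.1))).filter (fun x => !(x == k₀))).filter
              (fun k => !d.contains k))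
          = List.map (fun k => (k, pvGrp ((k₀, f₀) :: T) k))
            (((pvFirsts (T.map (·.1))).filter (fun x => !(x == k₀))).filter
              (fun k => !d.contains k)) := by
        refine List.map_congr_left (fun k hk => ?_)
        have hkne : k ≠ k₀ := by
          have := (List.mem_filter.mp ((List.mem_filter.mp hk).1)).2
          simpa using this
        rw [pvGrp_cons]; simp [Ne.symm hkne]
      rw [hkeep, List.map_cons, List.append_assoc, hk₀, List.singleton_append, htail]

-- B-side invariant: folding 'insert key (G key)' over the hits yields each first-seen
-- key once with its (key-determined) value, overwriting any prior value for the key.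
lemma pvInsG_foldl_items (H : List (String × String)) (G : String → List String)
    (d : PySem.Dict String (List String)) (hd : d.keys.Nodup) :
    (H.foldl (fun d p => d.insert p.1 (G p.1)) d).items
      = d.items.map (fun e => (e.1, if (H.map (·.1)).contains e.1 then G e.1 else e.2))
        ++ ((pvFirsts (H.map (·.1))).filter (fun k => !d.contains k)).map
             (fun k => (k, G k)) := by
  induction H generalizing d with
  | nil => simp [pvFirsts]
  | cons p T ih =>
    obtain ⟨k₀, f₀⟩ := p
    have hstep : (((k₀, f₀) :: T).foldl (fun d p => d.insert p.1 (G p.1)) d)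
        = T.foldl (fun d p => d.insert p.1 (G p.1)) (d.insert k₀ (G k₀)) := rfl
    have hd' : (d.insert k₀ (G k₀)).keys.Nodup := PySem.Dict.nodup_keys_insert _ _ _ hd
    rw [hstep, ih _ hd']
    have hfirst : pvFirsts (((k₀, f₀) :: T).map (·.1))
        = k₀ :: (pvFirsts (T.map (·.1))).filter (fun x => !(x == k₀)) := by
      simp [pvFirsts]
    have hconts : ∀ k, ((d.insert k₀ (G k₀)).contains k) = (k == k₀ || d.contains k) := by
      intro k; simp [PySem.Dict.contains_insert]
    have hfilt : (pvFirsts (T.map (·.1))).filter (fun k => !(d.insert k₀ (G k₀)).contains k)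
        = ((pvFirsts (T.map (·.1))).filter (fun x => !(x == k₀))).filter
            (fun k => !d.contains k) := by
      rw [List.filter_filter]
      exact List.filter_congr (fun k _ => by rw [hconts]; cases h : (k == k₀) <;> simp)
    rw [hfilt, hfirst]
    by_cases hc : d.contains k₀ = true
    · have hitems : (d.insert k₀ (G k₀)).items
          = d.items.map (fun e => if e.1 == k₀ then (k₀, G k₀) else e) :=
        PySem.Dict.items_insert_of_contains _ _ hc
      have hmap : ((d.insert k₀ (G k₀)).items).map
            (fun e => (e.1, if (T.map (·.1)).contains e.1 then G e.1 else e.2))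
          = d.items.map
              (fun e => (e.1, if (((k₀, f₀) :: T).map (·.1)).contains e.1 then G e.1 else e.2)) := by
        rw [hitems, List.map_map]
        refine List.map_congr_left (fun e he => ?_)
        by_cases hek : e.1 = k₀
        · cases h : (T.map (·.1)).contains k₀ <;> simp [Function.comp, hek]
        · have h0 : (e.1 == k₀) = false := by simpa using hek
          simp only [Function.comp_apply]
          rw [h0]
          simp only [List.map_cons, Bool.false_eq_true, if_false, List.contains_cons, h0, Bool.false_or]
      rw [hmap]
      have hdrop : List.filter (fun k => !d.contains k)
            (k₀ :: (pvFirsts (T.map (·.1))).filter (fun x => !(x == k₀)))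
          = ((pvFirsts (T.map (·.1))).filter (fun x => !(x == k₀))).filter
              (fun k => !d.contains k) := by
        rw [List.filter_cons]; simp [hc]
      rw [hdrop]
    · have hc' : d.contains k₀ = false := by simpa using hc
      have hitems : (d.insert k₀ (G k₀)).items = d.items ++ [(k₀, G k₀)] :=
        PySem.Dict.items_insert_of_not_contains _ _ hc'
      have hdk : ∀ e ∈ d.items, e.1 ≠ k₀ := by
        intro e he hek
        have : d.contains e.1 = true := by
          rw [PySem.Dict.contains_iff_mem_keys]
          exact PySem.Dict.mem_keys_of_mem_items _ he
        rw [hek, hc'] at this; exact absurd this (by simp)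
      have hmap : ((d.insert k₀ (G k₀)).items).map
            (fun e => (e.1, if (T.map (·.1)).contains e.1 then G e.1 else e.2))
          = d.items.map
              (fun e => (e.1, if (((k₀, f₀) :: T).map (·.1)).contains e.1 then G e.1 else e.2))
            ++ [(k₀, if (T.map (·.1)).contains k₀ then G k₀ else G k₀)] := by
        rw [hitems, List.map_append]
        congr 1
        refine List.map_congr_left (fun e he => ?_)
        have h0 : (e.1 == k₀) = false := by simpa using hdk e he
        simp only [List.map_cons, List.contains_cons, h0, Bool.false_or]
      rw [hmap]
      have hkeep : List.filter (fun k => !d.contains k)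
            (k₀ :: (pvFirsts (T.map (·.1))).filter (fun x => !(x == k₀)))
          = k₀ :: ((pvFirsts (T.map (·.1))).filter (fun x => !(x == k₀))).filter
              (fun k => !d.contains k) := by
        rw [List.filter_cons]; simp [hc']
      rw [hkeep, List.map_cons, List.append_assoc, List.singleton_append]
      simp

-- A's per-file inner loop = folding the setdefault/append step over that file's hits
lemma pvStep_eq_foldl_hits (cs : List (String × List String)) (f : String)
    (d : PySem.Dict String (List String)) :
    cs.foldl
      (fun d c =>
        if pvMatches (PySem.Str.lower f) c.2 then d.insert c.1 (d.getD c.1 [] ++ [f]) else d)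
      d
    = ((cs.filter (fun c => pvMatches (PySem.Str.lower f) c.2)).map
        (fun c => (c.1, f))).foldl pvIns d := by
  induction cs generalizing d with
  | nil => rfl
  | cons c t ih =>
    by_cases h : pvMatches (PySem.Str.lower f) c.2 = true
    · simp only [List.foldl_cons, h, if_true, List.filter_cons, List.map_cons]
      exact ih _
    · have h' : pvMatches (PySem.Str.lower f) c.2 = false := by simpa using h
      simp only [List.foldl_cons, h', Bool.false_eq_true, if_false, List.filter_cons]
      exact ih _

-- A's file loop = folding the setdefault/append step over all hits
lemma pvFoldl_step_eq_hits (fs : List String) (d : PySem.Dict String (List String)) :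
    fs.foldl pvStep d = (pvHits fs).foldl pvIns d := by
  induction fs generalizing d with
  | nil => rfl
  | cons f t ih =>
    have h1 : (f :: t).foldl pvStep d = t.foldl pvStep (pvStep d f) := rfl
    have h2 : pvHits (f :: t)
        = ((RISK_PATTERNS.filter (fun c => pvMatches (PySem.Str.lower f) c.2)).map
            (fun c => (c.1, f))) ++ pvHits t := by
      simp [pvHits]
    rw [h1, ih, h2, List.foldl_append, ← pvStep_eq_foldl_hits]
    rfl

-- ===== VERDICT (by name: the statement is the Claim_ definition above) =====
theorem collect_risks_spec : Claim_equal_collect_risks := by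
  intro fs _
  show collect_risks fs = collect_risks_alt fs
  have hemp : (PySem.Dict.empty : PySem.Dict String (List String)).keys.Nodup := by
    simp [PySem.Dict.keys_empty]
  have hA : collect_risks fs
      = (pvFirsts ((pvHits fs).map (·.1))).map (fun k => (k, pvGrp (pvHits fs) k)) := by
    rw [collect_risks, pvFoldl_step_eq_hits, pvIns_foldl_items _ _ hemp]
    simp [PySem.Dict.contains_empty,
      show (PySem.Dict.empty : PySem.Dict String (List String)).items = [] from rfl]
  have hB : collect_risks_alt fs
      = (pvFirsts ((pvHits fs).map (·.1))).map (fun k => (k, pvGrp (pvHits fs) k)) := by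
    rw [collect_risks_alt]
    show ((pvHits fs).foldl (fun d p => d.insert p.1 (pvGrp (pvHits fs) p.1))
        PySem.Dict.empty).items = _
    rw [pvInsG_foldl_items _ _ _ hemp]
    simp [PySem.Dict.contains_empty,
      show (PySem.Dict.empty : PySem.Dict String (List String)).items = [] from rfl]
  rw [hA, hB]
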